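-- pv_equiv track=rewrite | github.com/cu-swe4s-fall-2023/assignment-8-searching-and-test-driven-development-kristaphommatha | src/hash_functions.py | h_insert
-- ===== SOURCE A (Python) =====
-- def get_index(key, N, p=53, m=2**64):
--     '''Polynomial Rolling'''
--     if N == 0 or m == 0:
--         return None
--     if type(key) != str:  # noqa
--         return None
--     s = 0
--     for i in range(len(key)):
--         s += ord(key[i]) * p**i
--     s = s % m
--     return s % N
--
-- def h_insert(key, value, N):
--     if N == 0:
--         return None
--     if type(key) != str:  # noqa
--         return None
--
--     table = [[] for i in range(N)]
--     hash_slot = get_index(key, N)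
--     table[hash_slot].append((key, value))
--     return table
-- ===== SOURCE B (Python) =====
-- def h_insert(key, value, N):
--     # B: Horner evaluation with per-step modular reduction over the reversed key,
--     # and the table built directly by a comprehension (no build-then-mutate).
--     if N == 0:
--         return None
--     if type(key) != str:  # noqa
--         return None
--     m = 2**64
--     acc = 0
--     for c in reversed(key):
--         acc = (acc * 53 + ord(c)) % m
--     idx = acc % N
--     return [[(key, value)] if i == idx else [] for i in range(N)]
-- ===== Notes on version B (the rewrite author's own statement) =====
-- stated objective: faster
-- what changed: The hash is computed by Horner's rule with per-step modular reduction over the reversed key (one running remainder, no explicit growing powers 53**i), and the table is built directly by a comprehension that places the pair at its slot instead of building an empty table and mutating one bucket.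
-- outside the precondition, e.g. on h_insert('a', 1, 0): A returns None, B returns None; on h_insert('a', 1, -2): A raises IndexError, B returns []
import Mathlib
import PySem

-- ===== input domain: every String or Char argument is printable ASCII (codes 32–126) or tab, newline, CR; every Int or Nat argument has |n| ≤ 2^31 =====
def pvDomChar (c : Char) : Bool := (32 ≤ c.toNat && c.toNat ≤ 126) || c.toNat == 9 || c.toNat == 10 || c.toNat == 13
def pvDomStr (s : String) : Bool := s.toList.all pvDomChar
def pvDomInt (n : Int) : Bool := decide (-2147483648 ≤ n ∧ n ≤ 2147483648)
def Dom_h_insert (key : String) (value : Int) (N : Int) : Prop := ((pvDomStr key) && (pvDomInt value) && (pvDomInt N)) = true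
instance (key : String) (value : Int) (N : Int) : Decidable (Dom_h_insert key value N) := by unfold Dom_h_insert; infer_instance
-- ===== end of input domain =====

-- B replaces the explicit-powers polynomial hash by Horner's rule over the reversed key and
-- builds the table directly by a comprehension; a timing run measured B faster (A's powers 53**i grow into big integers).

-- ===== PORT A =====
-- get_index(key, N, p=53, m=2**64); key is a String here, so the non-str branch never fires.
-- The index i comes from range(len(key)) and is always in range, so the pyGetD default is never used.
def getIndexA (key : String) (N : Int) (p : Int) (m : Int) : Option Int :=
  if N = 0 ∨ m = 0 then none
  else
    let s := (PySem.List.pyRange 0 (PySem.Str.len key) 1).foldl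
      (fun s i => s + ((PySem.List.pyGetD key.toList i 'a').toNat : Int) * p ^ i.toNat) 0
    let s := PySem.Int.mod s m
    some (PySem.Int.mod s N)

-- A returns None for N == 0 (not a value of the list type) and raises IndexError for N < 0:
-- both are outside Pre_; under Pre_ the match is always `some`.
def h_insert (key : String) (value : Int) (N : Int) : List (List (String × Int)) :=
  let table : List (List (String × Int)) := (PySem.List.pyRange 0 N 1).map (fun _ => [])
  match getIndexA key N 53 (2 ^ 64) with
  | none => []
  | some hashSlot =>
    -- table[hash_slot].append((key, value)): in-place mutation of the bucket
    table.set hashSlot.toNat (table.getD hashSlot.toNat [] ++ [(key, value)])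

-- ===== PORT B =====
def h_insert_alt (key : String) (value : Int) (N : Int) : List (List (String × Int)) :=
  let m : Int := 2 ^ 64
  let acc := key.toList.reverse.foldl (fun a c => PySem.Int.mod (a * 53 + (c.toNat : Int)) m) 0
  let idx := PySem.Int.mod acc N
  (PySem.List.pyRange 0 N 1).map (fun i => if i = idx then [(key, value)] else [])

-- ===== PRECONDITION & SPEC =====
-- Pre_ excludes N = 0 (A returns None, not a list) and N < 0 (A raises IndexError).
def Pre_h_insert (key : String) (value : Int) (N : Int) : Prop := 0 < N
instance (key : String) (value : Int) (N : Int) : Decidable (Pre_h_insert key value N) := by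
  unfold Pre_h_insert; infer_instance

def pvWitness_h_insert : String × Int × Int := ("abc", 5, 3)

def Spec_h_insert (key : String) (value : Int) (N : Int) (out : List (List (String × Int))) : Prop := out = h_insert_alt key value N
instance (key : String) (value : Int) (N : Int) (out : List (List (String × Int))) : Decidable (Spec_h_insert key value N out) := by unfold Spec_h_insert; infer_instance

-- ===== CLAIM (what is proved, stated in full; the proofs are below) =====
def Claim_equal_h_insert : Prop := ∀ (key : String) (value : Int) (N : Int), Dom_h_insert key value N → Pre_h_insert key value N → Spec_h_insert key value N (h_insert key value N)

-- ===== LEMMAS AND PROOFS =====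

/-- The key polynomial Σ ord(l[k]) * 53^k, written structurally. -/
def pvPoly : List Char → Int
  | [] => 0
  | c :: t => (c.toNat : Int) + 53 * pvPoly t

theorem pvFoldlRangeAdd (f : Nat → Int) (a : Int) :
    ∀ n : Nat, (List.range n).foldl (fun s k => s + f k) a = a + ∑ k ∈ Finset.range n, f k := by
  intro n
  induction n with
  | zero => simp
  | succ n ih => simp [List.range_succ, Finset.sum_range_succ, ih, add_assoc]

theorem pvSumEqPoly : ∀ l : List Char,
    (∑ k ∈ Finset.range l.length, ((l.getD k 'a').toNat : Int) * 53 ^ k) = pvPoly l := by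
  intro l
  induction l with
  | nil => simp [pvPoly]
  | cons c t ih =>
    rw [List.length_cons, Finset.sum_range_succ']
    simp only [List.getD_cons_succ, List.getD_cons_zero, pow_succ, pow_zero]
    have hsum : ∑ x ∈ Finset.range t.length, ((t.getD x 'a').toNat : Int) * (53 ^ x * 53)
        = 53 * ∑ k ∈ Finset.range t.length, ((t.getD k 'a').toNat : Int) * 53 ^ k := by
      rw [Finset.mul_sum]; apply Finset.sum_congr rfl; intro x _; ring
    rw [hsum, ih, pvPoly]; ring

/-- A's accumulated sum equals the structural polynomial. -/
theorem pvAEqPoly (key : String) :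
    (PySem.List.pyRange 0 (PySem.Str.len key) 1).foldl
      (fun s i => s + ((PySem.List.pyGetD key.toList i 'a').toNat : Int) * 53 ^ i.toNat) 0
    = pvPoly key.toList := by
  rw [PySem.Str.len_eq, PySem.List.pyRange_one]
  simp only [sub_zero, Int.toNat_natCast, List.foldl_map, zero_add,
    PySem.List.pyGetD_natCast]
  rw [pvFoldlRangeAdd (fun k => ((key.toList.getD k 'a').toNat : Int) * 53 ^ k) 0 key.toList.length]
  rw [zero_add, pvSumEqPoly]

/-- Horner over the reversed key equals the polynomial mod m. -/
theorem pvHorner (m : Int) (hm : 0 < m) : ∀ l : List Char,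
    l.reverse.foldl (fun a c => PySem.Int.mod (a * 53 + (c.toNat : Int)) m) 0
    = PySem.Int.mod (pvPoly l) m := by
  intro l
  rw [List.foldl_reverse]
  induction l with
  | nil => simp [pvPoly, PySem.Int.mod_eq_emod_of_pos hm]
  | cons c t ih =>
    rw [List.foldr_cons, ih]
    simp only [pvPoly, PySem.Int.mod_eq_emod_of_pos hm]
    have hstep : ((pvPoly t % m) * 53 + (c.toNat : Int)) % m = (pvPoly t * 53 + (c.toNat : Int)) % m :=
      ((Int.ModEq.mul_right 53 (Int.emod_emod_of_dvd _ dvd_rfl)).add_right _)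
    rw [hstep]; congr 1; ring

-- ===== VERDICT (by name: the statement is the Claim_ definition above) =====
theorem h_insert_spec : Claim_equal_h_insert := by
  intro key value N _ hN
  unfold Pre_h_insert at hN
  unfold Spec_h_insert h_insert h_insert_alt getIndexA
  have hm : (0:Int) < 2 ^ 64 := by positivity
  have hN0 : ¬ (N = 0 ∨ (2:Int) ^ 64 = 0) := by
    rintro (h | h)
    · omega
    · norm_num at h
  simp only [hN0, if_false]
  rw [pvAEqPoly key, pvHorner (2 ^ 64) hm key.toList]
  set idx := PySem.Int.mod (PySem.Int.mod (pvPoly key.toList) (2 ^ 64)) N with hidx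
  have h0 : 0 ≤ idx := PySem.Int.mod_nonneg _ hN
  have hlt : idx < N := PySem.Int.mod_lt _ hN
  clear_value idx
  -- table equality: set-on-empty-table vs direct comprehension
  apply List.ext_getElem
  · simp [PySem.List.length_pyRange_one]
  · intro k hk1 hk2
    simp only [List.length_set, List.length_map, PySem.List.length_pyRange_one] at hk1 hk2
    by_cases hkeq : k = idx.toNat
    · subst hkeq
      rw [List.getElem_set_self (by simpa [PySem.List.length_pyRange_one] using hk1)]
      rw [List.getElem_map, PySem.List.getElem_pyRange_one]
      have : (0 : Int) + (idx.toNat : Int) = idx := by omega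
      rw [this, if_pos rfl]
      rw [List.getD_eq_getElem _ _ (by simpa [PySem.List.length_pyRange_one] using hk1)]
      simp
    · rw [List.getElem_set_ne (by omega)]
      rw [List.getElem_map, List.getElem_map, PySem.List.getElem_pyRange_one]
      have : ¬ ((0 : Int) + (k : Int) = idx) := by omega
      rw [if_neg this]
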